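-- pv_equiv track=rewrite | github.com/taotaoboat/si507 | finalProject_yunyang.py | match_complex_questions
-- ===== SOURCE A (Python) =====
-- import string
--
-- def simple_stem(word):
--     # Basic stemming: remove 's' at the end of the word
--     # Note: This is a very simplistic approach and may not be accurate for all words
--     if word.endswith('s'):
--         return word[:-1]
--     return word
--
-- def extract_keywords(sentence):
--     # Define a set of stopwords
--     stopwords = set(['the', 'what', 'is', 'how', 'do', 'does', 'explain', 'in', 'a', 'an', 'one','would','many','you','are','them','and','are'])
--     sentence = sentence.translate(str.maketrans('', '', string.punctuation))
--     keywords = set(simple_stem(word.lower()) for word in sentence.split() if word.lower() not in stopwords)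
--     return keywords
--
-- def match_complex_questions(simple_question_keywords, complex_questions):
--     # Score each complex question based on keyword matches
--     match_scores = {}
--     for complex_question in complex_questions:
--         complex_question_keywords = extract_keywords(complex_question)
--         common_keywords = simple_question_keywords.intersection(complex_question_keywords)
--
--         # Check if there is at least one common keyword
--         if len(common_keywords) > 0:
--             match_scores[complex_question] = len(common_keywords)
--
--     # Sort complex questions based on their match score
--     sorted_complex_questions = sorted(match_scores, key=match_scores.get, reverse=True)
--
--     # Return the top 10 matches
--     return sorted_complex_questions[:10]
-- ===== SOURCE B (Python) =====
-- import string
--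
-- def simple_stem(word):
--     if word.endswith('s'):
--         return word[:-1]
--     return word
--
-- def extract_keywords(sentence):
--     stopwords = set(['the', 'what', 'is', 'how', 'do', 'does', 'explain', 'in', 'a', 'an', 'one','would','many','you','are','them','and','are'])
--     sentence = sentence.translate(str.maketrans('', '', string.punctuation))
--     return set(simple_stem(word.lower()) for word in sentence.split() if word.lower() not in stopwords)
--
-- def match_complex_questions(simple_question_keywords, complex_questions):
--     # One pass: put each scored question (first occurrence only) into a bucket
--     # keyed by its integer score; no comparison sort.
--     buckets = {}
--     seen = set()
--     max_score = 0
--     for question in complex_questions: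
--         if question in seen:
--             continue
--         score = len(simple_question_keywords.intersection(extract_keywords(question)))
--         if score > 0:
--             seen.add(question)
--             buckets.setdefault(score, []).append(question)
--             if score > max_score:
--                 max_score = score
--     result = []
--     for s in range(max_score, 0, -1):
--         result += buckets.get(s, [])
--     return result[:10]
-- ===== Notes on version B (the rewrite author's own statement) =====
-- stated objective: faster
-- what changed: Replaces A's score-dict plus stable comparison sort (sorted by score, reverse=True) with a single bucketing pass (score -> questions in first-occurrence order, with a seen-set for dedup) followed by one descending sweep over the integer scores; the seen-set also skips re-extracting keywords for duplicate questions, which A recomputes.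
import Mathlib
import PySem

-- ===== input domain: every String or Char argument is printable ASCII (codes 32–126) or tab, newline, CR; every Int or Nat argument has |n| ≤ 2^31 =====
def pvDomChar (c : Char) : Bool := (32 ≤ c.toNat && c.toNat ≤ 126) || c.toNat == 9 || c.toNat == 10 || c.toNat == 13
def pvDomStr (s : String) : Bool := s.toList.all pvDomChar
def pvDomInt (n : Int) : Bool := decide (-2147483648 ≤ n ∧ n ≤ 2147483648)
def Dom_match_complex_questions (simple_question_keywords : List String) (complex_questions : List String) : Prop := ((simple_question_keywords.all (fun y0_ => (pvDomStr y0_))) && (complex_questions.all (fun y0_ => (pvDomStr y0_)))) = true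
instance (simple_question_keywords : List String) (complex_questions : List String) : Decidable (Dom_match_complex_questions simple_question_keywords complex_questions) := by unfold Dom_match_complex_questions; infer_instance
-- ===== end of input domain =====

-- B replaces A's comparison sort of the score dict by a single bucketing pass (score → questions)
-- plus a descending sweep over the integer scores; objective: alternative algorithm, same results.

-- ===== PORT A =====
-- shared helper simple_stem (identical in Source A and Source B)
def simpleStem (word : String) : String :=
  if PySem.Str.endswith word "s" then PySem.Str.slice word none (some (-1)) else word

-- string.punctuation (the 32 ASCII punctuation characters)
def pvPunct : List Char := "!\"#$%&'()*+,-./:;<=>?@[\\]^_`{|}~".toList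

-- shared helper extract_keywords (identical in Source A and Source B);
-- sentence.translate(str.maketrans('', '', string.punctuation)) deletes exactly the
-- characters of string.punctuation, ported exactly as a character filter.
def extractKeywords (sentence : String) : PySem.Set String :=
  let stopwords : PySem.Set String := PySem.Set.ofList ["the", "what", "is", "how", "do", "does", "explain", "in", "a", "an", "one", "would", "many", "you", "are", "them", "and", "are"]
  let cleaned : String := String.ofList (sentence.toList.filter (fun c => !pvPunct.contains c))
  PySem.Set.ofList (((PySem.Str.split₀ cleaned).filter (fun word => !stopwords.contains (PySem.Str.lower word))).map (fun word => simpleStem (PySem.Str.lower word)))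

def match_complex_questions (simple_question_keywords : List String) (complex_questions : List String) : List String :=
  let match_scores : PySem.Dict String Int :=
    complex_questions.foldl (fun match_scores complex_question =>
      let complex_question_keywords := extractKeywords complex_question
      let common_keywords := PySem.Set.inter (PySem.Set.ofList simple_question_keywords) complex_question_keywords
      if 0 < (common_keywords.length : Int) then
        match_scores.insert complex_question (common_keywords.length : Int)
      else match_scores) PySem.Dict.empty
  -- sorted(match_scores, key=match_scores.get, reverse=True): every listed key is in the dict,
  -- so .get returns its int value = .getD _ 0 on every element being sorted
  let sorted_complex_questions := PySem.List.sorted match_scores.keys (fun q => match_scores.getD q 0) true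
  sorted_complex_questions.take 10    -- xs[:10], a nonnegative literal bound = take 10

-- ===== PORT B =====
def match_complex_questions_alt (simple_question_keywords : List String) (complex_questions : List String) : List String :=
  -- state: (buckets : score → questions, seen, max_score)
  let st :=
    complex_questions.foldl (fun (st : PySem.Dict Int (List String) × PySem.Set String × Int) question =>
      if st.2.1.contains question then st
      else
        let score : Int := ((PySem.Set.inter (PySem.Set.ofList simple_question_keywords) (extractKeywords question)).length : Int)
        if 0 < score then
          (PySem.Dict.modify st.1 score [] (fun l => l ++ [question]),   -- buckets.setdefault(score, []).append(question)
           st.2.1.add question,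
           if st.2.2 < score then score else st.2.2)
        else st) (PySem.Dict.empty, PySem.Set.empty, 0)
  let result := (PySem.List.pyRange st.2.2 0 (-1)).foldl (fun result s => result ++ st.1.getD s []) []
  result.take 10    -- result[:10]

-- ===== PRECONDITION & SPEC =====
def Spec_match_complex_questions (simple_question_keywords : List String) (complex_questions : List String) (out : List String) : Prop := out = match_complex_questions_alt simple_question_keywords complex_questions
instance (simple_question_keywords : List String) (complex_questions : List String) (out : List String) : Decidable (Spec_match_complex_questions simple_question_keywords complex_questions out) := by unfold Spec_match_complex_questions; infer_instance

-- ===== CLAIM (what is proved, stated in full; the proofs are below) =====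
def Claim_equal_match_complex_questions : Prop := ∀ (simple_question_keywords : List String) (complex_questions : List String), Dom_match_complex_questions simple_question_keywords complex_questions → Spec_match_complex_questions simple_question_keywords complex_questions (match_complex_questions simple_question_keywords complex_questions)

-- ===== LEMMAS AND PROOFS =====

-- the score of one question (the common subexpression of both ports)
def pvSc (s : List String) (q : String) : Int :=
  ((PySem.Set.inter (PySem.Set.ofList s) (extractKeywords q)).length : Int)

-- the scored questions of c, first occurrences in order; their max score
def pvF (s : List String) (c : List String) : List String :=
  c.filter (fun q => decide (0 < pvSc s q))
def pvL (s : List String) (c : List String) : List String :=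
  PySem.Set.ofList (pvF s c)
def pvM (s : List String) (c : List String) : Int :=
  (pvL s c).foldl (fun m q => max m (pvSc s q)) 0

-- insertBy walks past a prefix none of whose elements satisfy `before x ·`
lemma insertBy_append {α : Type} (before : α → α → Bool) (x : α) (l1 l2 : List α)
    (h : ∀ y ∈ l1, before x y = false) :
    PySem.List.insertBy before x (l1 ++ l2) = l1 ++ PySem.List.insertBy before x l2 := by
  induction l1 with
  | nil => simp
  | cons y t ih =>
    have hy : before x y = false := h y (List.mem_cons_self)
    simp [PySem.List.insertBy, hy, ih (fun z hz => h z (List.mem_cons_of_mem _ hz))]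

-- insertBy puts x in front when every element (in particular the head) satisfies `before x ·`
lemma insertBy_all {α : Type} (before : α → α → Bool) (x : α) (l : List α)
    (h : ∀ y ∈ l, before x y = true) :
    PySem.List.insertBy before x l = x :: l := by
  cases l with
  | nil => simp [PySem.List.insertBy]
  | cons y t => simp [PySem.List.insertBy, h y (List.mem_cons_self)]

-- splitting a countdown range
lemma pyRange_neg_one_append (a k b : Int) (h1 : b ≤ k) (h2 : k ≤ a) :
    PySem.List.pyRange a b (-1) = PySem.List.pyRange a k (-1) ++ PySem.List.pyRange k b (-1) := by
  rw [PySem.List.pyRange_neg_one_eq_reverse, PySem.List.pyRange_neg_one_eq_reverse,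
      PySem.List.pyRange_neg_one_eq_reverse, ← List.reverse_append,
      ← PySem.List.pyRange_one_append (b+1) (k+1) (a+1) (by omega) (by omega)]

-- inserting one more element into the bucket concatenation
lemma bucket_insert (key : String → Int) (mx : Int) (P : List String) (x : String)
    (h1 : 1 ≤ key x) (h2 : key x ≤ mx) :
    PySem.List.insertBy (fun a b => decide (key b < key a)) x
      ((PySem.List.pyRange mx 0 (-1)).flatMap (fun v => P.filter (fun y => key y == v)))
    = (PySem.List.pyRange mx 0 (-1)).flatMap (fun v => (P ++ [x]).filter (fun y => key y == v)) := by
  have hsplit : PySem.List.pyRange mx 0 (-1)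
      = PySem.List.pyRange mx (key x) (-1) ++ PySem.List.pyRange (key x) 0 (-1) :=
    pyRange_neg_one_append mx (key x) 0 (by omega) h2
  have hcons : PySem.List.pyRange (key x) 0 (-1)
      = key x :: PySem.List.pyRange (key x - 1) 0 (-1) :=
    PySem.List.pyRange_neg_one_cons (by omega)
  have hfs : ∀ v : Int, (P ++ [x]).filter (fun y => key y == v)
      = P.filter (fun y => key y == v) ++ (if key x = v then [x] else []) := by
    intro v
    rw [List.filter_append]
    by_cases hv : key x = v <;> simp [hv]
  have hhigh : ∀ v : Int, key x < v → ((P ++ [x]).filter (fun y => key y == v)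
      = P.filter (fun y => key y == v)) := by
    intro v hv; rw [hfs v]; simp [show ¬ (key x = v) by omega]
  have hlow : ∀ v : Int, v < key x → ((P ++ [x]).filter (fun y => key y == v)
      = P.filter (fun y => key y == v)) := by
    intro v hv; rw [hfs v]; simp [show ¬ (key x = v) by omega]
  have hpre : ∀ y ∈ (PySem.List.pyRange mx (key x) (-1)).flatMap
        (fun v => P.filter (fun y => key y == v)) ++ P.filter (fun y => key y == key x),
      (fun a b => decide (key b < key a)) x y = false := by
    intro y hy
    rcases List.mem_append.1 hy with hy | hy
    · rcases List.mem_flatMap.1 hy with ⟨v, hv, hyv⟩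
      have hkv : key x < v := (PySem.List.mem_pyRange_neg_one.1 hv).1
      have hyk : key y = v := beq_iff_eq.1 (List.mem_filter.1 hyv).2
      simp; omega
    · have hyk : key y = key x := beq_iff_eq.1 (List.mem_filter.1 hy).2
      simp; omega
  have hall : ∀ y ∈ (PySem.List.pyRange (key x - 1) 0 (-1)).flatMap
        (fun v => P.filter (fun y => key y == v)),
      (fun a b => decide (key b < key a)) x y = true := by
    intro y hy
    rcases List.mem_flatMap.1 hy with ⟨v, hv, hyv⟩
    have hkv : v ≤ key x - 1 := (PySem.List.mem_pyRange_neg_one.1 hv).2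
    have hyk : key y = v := beq_iff_eq.1 (List.mem_filter.1 hyv).2
    simp; omega
  rw [hsplit, hcons, List.flatMap_append, List.flatMap_cons, List.flatMap_append, List.flatMap_cons]
  rw [← List.append_assoc]
  rw [insertBy_append _ x _ _ hpre, insertBy_all _ x _ hall]
  rw [List.flatMap_congr (l := PySem.List.pyRange mx (key x) (-1))
    (fun v hv => hhigh v (PySem.List.mem_pyRange_neg_one.1 hv).1)]
  rw [List.flatMap_congr (l := PySem.List.pyRange (key x - 1) 0 (-1))
    (fun v hv => hlow v (by have := (PySem.List.mem_pyRange_neg_one.1 hv).2; omega))]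
  rw [hfs (key x)]
  simp

-- the stable reverse sort by an integer key in (0, mx] IS the descending bucket concatenation
lemma sorted_rev_buckets (key : String → Int) (mx : Int) (L : List String)
    (h : ∀ x ∈ L, 1 ≤ key x ∧ key x ≤ mx) :
    PySem.List.sorted L key true
      = (PySem.List.pyRange mx 0 (-1)).flatMap (fun v => L.filter (fun y => key y == v)) := by
  rw [PySem.List.sorted_rev_eq_foldl_insertBy]
  induction L using List.reverseRecOn with
  | nil => simp
  | append_singleton P x ih =>
    rw [List.foldl_append, List.foldl_cons, List.foldl_nil,
        ih (fun y hy => h y (List.mem_append_left _ hy))]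
    exact bucket_insert key mx P x (h x (by simp)).1 (h x (by simp)).2

-- lookup in a dict built by inserting a value that depends on the key only
lemma getD_foldl_insert (f : String → Int) (l : List String) (d : PySem.Dict String Int)
    (q : String) (d0 : Int) :
    (l.foldl (fun d x => d.insert x (f x)) d).getD q d0
      = if q ∈ l then f q else d.getD q d0 := by
  induction l using List.reverseRecOn with
  | nil => simp
  | append_singleton t x ih =>
    rw [List.foldl_append, List.foldl_cons, List.foldl_nil, PySem.Dict.getD_insert, ih]
    by_cases hqx : q = x
    · simp [hqx]
    · by_cases hqt : q ∈ t <;> simp [hqx, hqt]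

-- characterization of A: the canonical bucket form
lemma A_canonical (s c : List String) :
    match_complex_questions s c
      = ((PySem.List.pyRange (pvM s c) 0 (-1)).flatMap
          (fun v => (pvL s c).filter (fun y => pvSc s y == v))).take 10 := by
  have hA : match_complex_questions s c
      = (PySem.List.sorted
          (c.foldl (fun d q => if 0 < pvSc s q then d.insert q (pvSc s q) else d)
            (PySem.Dict.empty : PySem.Dict String Int)).keys
          (fun q => (c.foldl (fun d q => if 0 < pvSc s q then d.insert q (pvSc s q) else d)
            (PySem.Dict.empty : PySem.Dict String Int)).getD q 0) true).take 10 := rfl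
  set d := c.foldl (fun d q => if 0 < pvSc s q then d.insert q (pvSc s q) else d)
    (PySem.Dict.empty : PySem.Dict String Int) with hddef
  have hd : d = (pvF s c).foldl (fun d q => d.insert q (pvSc s q))
      (PySem.Dict.empty : PySem.Dict String Int) := by
    rw [hddef, PySem.List.foldl_ite_eq_foldl_filter (fun q => 0 < pvSc s q)
      (fun d q => d.insert q (pvSc s q)) c (PySem.Dict.empty : PySem.Dict String Int)]
    rfl
  have hkeys : d.keys = pvL s c := by
    rw [hd]
    rw [PySem.Dict.keys_foldl_insert (pvF s c) (fun _ q => pvSc s q)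
      (PySem.Dict.empty : PySem.Dict String Int)]
    rfl
  have hgetD : ∀ q ∈ pvL s c, d.getD q 0 = pvSc s q := by
    intro q hq
    have hqf : q ∈ pvF s c := (PySem.Set.mem_ofList _ _).1 hq
    rw [hd, getD_foldl_insert]
    simp [hqf]
  have hpos : ∀ q ∈ pvL s c, 0 < pvSc s q := by
    intro q hq
    have hqf : q ∈ pvF s c := (PySem.Set.mem_ofList _ _).1 hq
    have := (List.mem_filter.1 hqf).2
    exact of_decide_eq_true this
  have hle : ∀ q ∈ pvL s c, pvSc s q ≤ pvM s c := by
    intro q hq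
    exact (PySem.List.le_foldl_max_int (pvL s c) (pvSc s) 0).2 q hq
  have hkeyb : ∀ q ∈ pvL s c,
      1 ≤ (fun q => d.getD q 0) q ∧ (fun q => d.getD q 0) q ≤ pvM s c := by
    intro q hq
    simp only
    rw [hgetD q hq]
    exact ⟨by have := hpos q hq; omega, hle q hq⟩
  rw [hA, hkeys]
  rw [sorted_rev_buckets (fun q => d.getD q 0) (pvM s c) (pvL s c) hkeyb]
  congr 1
  exact List.flatMap_congr (fun v _ =>
    List.filter_congr (fun y hy => by simp only [hgetD y hy]))

-- B's folded state, named for the proofs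
def pvBFold (s c : List String) : PySem.Dict Int (List String) × PySem.Set String × Int :=
  c.foldl (fun (st : PySem.Dict Int (List String) × PySem.Set String × Int) question =>
    if st.2.1.contains question then st
    else
      let score : Int := ((PySem.Set.inter (PySem.Set.ofList s) (extractKeywords question)).length : Int)
      if 0 < score then
        (PySem.Dict.modify st.1 score [] (fun l => l ++ [question]),
         st.2.1.add question,
         if st.2.2 < score then score else st.2.2)
      else st) ((PySem.Dict.empty : PySem.Dict Int (List String)), (PySem.Set.empty : PySem.Set String), (0 : Int))

-- invariant of B's single pass: seen = the scored questions (first occurrences),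
-- max = their maximal score, and each bucket is the in-order filter at its score
lemma B_inv (s c : List String) :
    (pvBFold s c).2.1 = pvL s c ∧ (pvBFold s c).2.2 = pvM s c ∧
      ∀ v : Int, (pvBFold s c).1.getD v [] = (pvL s c).filter (fun y => pvSc s y == v) := by
  induction c using List.reverseRecOn with
  | nil => exact ⟨rfl, rfl, fun v => rfl⟩
  | append_singleton c x ih =>
    obtain ⟨h1, h2, h3⟩ := ih
    have hfold : pvBFold s (c ++ [x]) =
        (if (pvBFold s c).2.1.contains x then pvBFold s c
         else
          let score : Int := ((PySem.Set.inter (PySem.Set.ofList s) (extractKeywords x)).length : Int)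
          if 0 < score then
            (PySem.Dict.modify (pvBFold s c).1 score [] (fun l => l ++ [x]),
             (pvBFold s c).2.1.add x,
             if (pvBFold s c).2.2 < score then score else (pvBFold s c).2.2)
          else pvBFold s c) := by
      simp only [pvBFold]
      rw [List.foldl_append, List.foldl_cons, List.foldl_nil]
    have hsc_eq : ((PySem.Set.inter (PySem.Set.ofList s) (extractKeywords x)).length : Int) = pvSc s x := rfl
    rw [hsc_eq] at hfold
    have hFapp : pvF s (c ++ [x]) = pvF s c ++ if 0 < pvSc s x then [x] else [] := by
      simp only [pvF, List.filter_append]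
      by_cases h : 0 < pvSc s x <;> simp [h]
    by_cases hxc : (pvL s c).contains x = true
    · -- x was already recorded (hence scored): everything is unchanged
      have hxc' : (pvBFold s c).2.1.contains x = true := by rw [h1]; exact hxc
      have hxF : x ∈ c.filter (fun q => decide (0 < pvSc s q)) :=
        (PySem.Set.mem_ofList _ _).1 ((PySem.Set.contains_iff _ _).1 hxc)
      have hxsc : 0 < pvSc s x := by simpa using (List.mem_filter.1 hxF).2
      have hxF0 : x ∈ pvF s c := hxF
      have hLeq : pvL s (c ++ [x]) = pvL s c := by
        simp only [pvL, hFapp, if_pos hxsc, PySem.Set.ofList_eq_foldl, List.foldl_append,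
          List.foldl_cons, List.foldl_nil]
        rw [← PySem.Set.ofList_eq_foldl]
        simp [PySem.Set.add, hxF0]
      have hMeq : pvM s (c ++ [x]) = pvM s c := by rw [pvM, hLeq]; rfl
      rw [hfold, if_pos hxc', hLeq, hMeq]
      exact ⟨h1, h2, fun v => by rw [h3 v]⟩
    · have hxc' : ¬ ((pvBFold s c).2.1.contains x = true) := by rw [h1]; exact hxc
      rw [hfold, if_neg hxc']
      simp only []
      by_cases hsc : 0 < pvSc s x
      · -- new scored question: it joins seen, its bucket, and the running max
        rw [if_pos hsc]
        have hnF : x ∉ pvF s c := fun hmem =>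
          hxc ((PySem.Set.contains_iff _ _).2 ((PySem.Set.mem_ofList _ _).2 hmem))
        have hnL : x ∉ pvL s c := fun hmem => hnF ((PySem.Set.mem_ofList _ _).1 hmem)
        have hLeq : pvL s (c ++ [x]) = pvL s c ++ [x] := by
          simp only [pvL, hFapp, if_pos hsc, PySem.Set.ofList_eq_foldl, List.foldl_append,
            List.foldl_cons, List.foldl_nil]
          rw [← PySem.Set.ofList_eq_foldl]
          simp [PySem.Set.add, hnF]
        have hMeq : pvM s (c ++ [x]) = if pvM s c < pvSc s x then pvSc s x else pvM s c := by
          rw [pvM, hLeq, List.foldl_append, List.foldl_cons, List.foldl_nil, ← pvM]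
          by_cases h : pvM s c < pvSc s x
          · rw [if_pos h, max_eq_right h.le]
          · rw [if_neg h, max_eq_left (not_lt.1 h)]
        refine ⟨?_, ?_, fun v => ?_⟩
        · show (pvBFold s c).2.1.add x = pvL s (c ++ [x])
          rw [h1, hLeq]
          simp [PySem.Set.add, hnL]
        · show (if (pvBFold s c).2.2 < pvSc s x then pvSc s x else (pvBFold s c).2.2) = pvM s (c ++ [x])
          rw [h2, hMeq]
        · show (PySem.Dict.modify (pvBFold s c).1 (pvSc s x) [] (fun l => l ++ [x])).getD v []
            = (pvL s (c ++ [x])).filter (fun y => pvSc s y == v)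
          rw [hLeq]
          simp only [PySem.Dict.modify, PySem.Dict.getD_insert, List.filter_append]
          by_cases hv : v = pvSc s x
          · rw [if_pos hv, h3 (pvSc s x), hv]
            simp
          · rw [if_neg hv, h3 v]
            have hbv : (pvSc s x == v) = false := by simp [Ne.symm hv]
            simp [hbv]
      · -- unscored question: nothing changes
        rw [if_neg hsc]
        have hLeq : pvL s (c ++ [x]) = pvL s c := by
          simp only [pvL, hFapp, if_neg hsc, List.append_nil]
        have hMeq : pvM s (c ++ [x]) = pvM s c := by rw [pvM, hLeq]; rfl
        rw [hLeq, hMeq]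
        exact ⟨h1, h2, fun v => by rw [h3 v]⟩

-- characterization of B: the same canonical bucket form
lemma B_canonical (s c : List String) :
    match_complex_questions_alt s c
      = ((PySem.List.pyRange (pvM s c) 0 (-1)).flatMap
          (fun v => (pvL s c).filter (fun y => pvSc s y == v))).take 10 := by
  have hB : match_complex_questions_alt s c
      = ((PySem.List.pyRange (pvBFold s c).2.2 0 (-1)).foldl
          (fun r v => r ++ (pvBFold s c).1.getD v []) []).take 10 := rfl
  obtain ⟨h1, h2, h3⟩ := B_inv s c
  rw [hB, h2, PySem.List.foldl_append_eq_flatMap (fun v => (pvBFold s c).1.getD v [])]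
  simp only [List.nil_append]
  congr 1
  exact List.flatMap_congr (fun v _ => h3 v)

-- ===== VERDICT (by name: the statement is the Claim_ definition above) =====
theorem match_complex_questions_spec : Claim_equal_match_complex_questions := by
  intro s c _
  unfold Spec_match_complex_questions
  rw [A_canonical, B_canonical]
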